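-- pv_equiv track=rewrite | github.com/Jimmy980212/Vuldetection_System | agents/preprocess_components.py | extract_slice_code
-- ===== SOURCE A (Python) =====
-- from typing import Any, Callable, Dict, List, Optional, Set, Tuple
--
-- def extract_slice_code(lines: List[str], slice_lines: Set[int]) -> str:
--     if not lines or not slice_lines:
--         return ""
--     content = []
--     for line_num in sorted(slice_lines):
--         if 1 <= line_num <= len(lines):
--             content.append(f"=> {line_num}: {lines[line_num - 1].rstrip()}")
--     return "\n".join(content)
-- ===== SOURCE B (Python) =====
-- def extract_slice_code(lines, slice_lines):
--     return "\n".join(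
--         f"=> {i}: {text.rstrip()}"
--         for i, text in enumerate(lines, start=1)
--         if i in slice_lines
--     )
-- ===== Notes on version B (the rewrite author's own statement) =====
-- stated objective: idiomatic
-- what changed: B drops the sort and the list indexing: it walks the source lines once with enumerate(start=1) and keeps a line when its number is in the set, which yields the same ascending order; the empty guard becomes the empty join.
import Mathlib
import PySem

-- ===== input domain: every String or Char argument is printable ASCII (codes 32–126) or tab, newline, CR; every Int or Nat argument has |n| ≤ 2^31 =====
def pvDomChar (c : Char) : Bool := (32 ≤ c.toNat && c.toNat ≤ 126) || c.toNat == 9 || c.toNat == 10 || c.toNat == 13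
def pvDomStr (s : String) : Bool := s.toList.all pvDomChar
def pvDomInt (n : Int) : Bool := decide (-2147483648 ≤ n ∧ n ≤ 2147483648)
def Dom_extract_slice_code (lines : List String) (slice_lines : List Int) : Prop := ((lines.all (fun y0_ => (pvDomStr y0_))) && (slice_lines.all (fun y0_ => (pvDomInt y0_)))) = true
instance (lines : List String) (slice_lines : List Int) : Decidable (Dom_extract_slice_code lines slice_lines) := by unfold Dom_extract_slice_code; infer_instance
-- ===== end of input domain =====

-- B drops the sort and the set-indexing loop: it walks the lines once with enumerate(start=1)
-- and keeps a line when its number is in the set (idiomatic, not claimed faster).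


-- ===== PORT A =====
def extract_slice_code (lines : List String) (slice_lines : List Int) : String :=
  if lines = [] ∨ slice_lines = [] then ""
  else
    let content : List String :=
      (PySem.List.sorted slice_lines (fun x => x) false).foldl
        (fun acc line_num =>
          if 1 ≤ line_num ∧ line_num ≤ (lines.length : Int) then
            acc ++ ["=> " ++ PySem.Int.toStr line_num ++ ": " ++
              PySem.Str.rstrip (PySem.List.pyGetD lines (line_num - 1) "")]
          else acc) []
    PySem.Str.join "\n" content

-- ===== PORT B =====
def extract_slice_code_alt (lines : List String) (slice_lines : List Int) : String :=
  PySem.Str.join "\n"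
    ((PySem.List.enumerate lines 1).filterMap
      (fun p =>
        if p.1 ∈ slice_lines then
          some ("=> " ++ PySem.Int.toStr p.1 ++ ": " ++ PySem.Str.rstrip p.2)
        else none))

-- ===== PRECONDITION & SPEC =====
-- The Python parameter slice_lines is a set; its List model holds distinct elements.
def Pre_extract_slice_code (lines : List String) (slice_lines : List Int) : Prop :=
  slice_lines.Nodup
instance (lines : List String) (slice_lines : List Int) : Decidable (Pre_extract_slice_code lines slice_lines) := by unfold Pre_extract_slice_code; infer_instance
def pvWitness_extract_slice_code : List String × List Int := (["a ", "b"], [2, 1])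

def Spec_extract_slice_code (lines : List String) (slice_lines : List Int) (out : String) : Prop := out = extract_slice_code_alt lines slice_lines
instance (lines : List String) (slice_lines : List Int) (out : String) : Decidable (Spec_extract_slice_code lines slice_lines out) := by unfold Spec_extract_slice_code; infer_instance

-- ===== CLAIM (what is proved, stated in full; the proofs are below) =====
def Claim_equal_extract_slice_code : Prop := ∀ (lines : List String) (slice_lines : List Int), Dom_extract_slice_code lines slice_lines → Pre_extract_slice_code lines slice_lines → Spec_extract_slice_code lines slice_lines (extract_slice_code lines slice_lines)

-- ===== LEMMAS AND PROOFS =====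

-- the per-line formatter both programs share
def pvFmt (lines : List String) (j : Int) : String :=
  "=> " ++ PySem.Int.toStr j ++ ": " ++ PySem.Str.rstrip (PySem.List.pyGetD lines (j - 1) "")

lemma foldl_append_ite {a b : Type} (p : a -> Prop) [DecidablePred p] (f : a -> b)
    (l : List a) (acc : List b) :
    l.foldl (fun acc x => if p x then acc ++ [f x] else acc) acc
      = acc ++ (l.filter (fun x => decide (p x))).map f := by
  induction l generalizing acc with
  | nil => simp
  | cons x l ih => by_cases h : p x <;> simp [h, ih]

lemma filterMap_if {a b : Type} (l : List a) (p : a -> Prop) [DecidablePred p] (F : a -> b) :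
    l.filterMap (fun j => if p j then some (F j) else none)
      = (l.filter (fun j => decide (p j))).map F := by
  induction l with
  | nil => rfl
  | cons x l ih => by_cases h : p x <;> simp [h, ih]

lemma enumerate_eq_map_range (lines : List String) (s : Int) (hs : 0 <= s) :
    PySem.List.enumerate lines s =
      (PySem.List.pyRange s (s + lines.length) 1).map
        (fun j => (j, PySem.List.pyGetD lines (j - s) "")) := by
  induction lines generalizing s with
  | nil => simp [PySem.List.enumerate, PySem.List.pyRange_one_eq_nil]
  | cons x xs ih =>
    have h1 : s < s + (x :: xs).length := by simp
    rw [PySem.List.pyRange_one_cons h1]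
    simp only [List.map_cons, PySem.List.enumerate_cons]
    have hx : PySem.List.pyGetD (x :: xs) (s - s) "" = x := by
      simp [sub_self, PySem.List.pyGetD, PySem.List.pyGet?, PySem.List.pyIdx?]
    rw [hx]
    congr 1
    rw [ih (s + 1) (by omega)]
    have h2 : s + 1 + (xs.length : Int) = s + (x :: xs).length := by simp; omega
    rw [h2]
    apply List.map_congr_left
    intro j hj
    rw [PySem.List.mem_pyRange_one] at hj
    show (j, PySem.List.pyGetD xs (j - (s + 1)) "") = (j, PySem.List.pyGetD (x :: xs) (j - s) "")
    have hstep : ∀ (k : Nat), PySem.List.pyGetD xs (k : Int) "" = PySem.List.pyGetD (x :: xs) ((k : Int) + 1) "" := by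
      intro k
      have hc : ((k : Int) + 1) = ((k + 1 : Nat) : Int) := by push_cast; ring
      rw [hc, PySem.List.pyGetD_natCast, PySem.List.pyGetD_natCast]
      simp [List.getD]
    have hk : j - (s + 1) = (((j - (s + 1)).toNat : Nat) : Int) := by omega
    rw [hk, hstep]
    congr 2
    omega

-- B as join of fmt over the ascending filtered range
lemma alt_eq (lines : List String) (slice_lines : List Int) :
    extract_slice_code_alt lines slice_lines =
      PySem.Str.join "\n"
        (((PySem.List.pyRange 1 (1 + lines.length) 1).filter
            (fun j => decide (j ∈ slice_lines))).map (pvFmt lines)) := by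
  unfold extract_slice_code_alt
  rw [enumerate_eq_map_range lines 1 (by norm_num), List.filterMap_map]
  congr 1
  have h := filterMap_if (PySem.List.pyRange 1 (1 + lines.length) 1)
      (fun j => j ∈ slice_lines) (pvFmt lines)
  exact h

-- A as join of fmt over the sorted, range-filtered set
lemma a_eq (lines : List String) (slice_lines : List Int) :
    extract_slice_code lines slice_lines =
      PySem.Str.join "\n"
        (((PySem.List.sorted slice_lines (fun x => x) false).filter
            (fun j => decide (1 <= j ∧ j <= (lines.length : Int)))).map (pvFmt lines)) := by
  unfold extract_slice_code
  split
  · rename_i h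
    have hfil : ((PySem.List.sorted slice_lines (fun x => x) false).filter
        (fun j => decide (1 <= j ∧ j <= (lines.length : Int)))) = [] := by
      rcases h with h | h
      · subst h
        apply List.filter_eq_nil_iff.mpr
        intro j _
        simp
        omega
      · subst h
        rfl
    rw [hfil]
    rfl
  · show PySem.Str.join "\n"
        ((PySem.List.sorted slice_lines (fun x => x) false).foldl
          (fun acc j => if 1 <= j ∧ j <= (lines.length : Int) then acc ++ [pvFmt lines j] else acc)
          []) = _
    rw [foldl_append_ite (fun j : Int => 1 <= j ∧ j <= (lines.length : Int)) (pvFmt lines)]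
    rfl

-- the two index lists coincide: strictly increasing with the same members
lemma lists_eq (lines : List String) (slice_lines : List Int) (hnd : slice_lines.Nodup) :
    (PySem.List.sorted slice_lines (fun x => x) false).filter
        (fun j => decide (1 <= j ∧ j <= (lines.length : Int))) =
      (PySem.List.pyRange 1 (1 + lines.length) 1).filter
        (fun j => decide (j ∈ slice_lines)) := by
  have hperm : (PySem.List.sorted slice_lines (fun x => x) false).Perm slice_lines :=
    PySem.List.sorted_perm ..
  have hndl : (PySem.List.sorted slice_lines (fun x => x) false).Nodup :=
    hperm.nodup_iff.mpr hnd
  have hlt : (PySem.List.sorted slice_lines (fun x => x) false).Pairwise (· < ·) := by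
    have hle := PySem.List.sorted_pairwise slice_lines (fun x => x) (κ := Int)
    exact (List.Pairwise.and hle hndl).imp (fun h => lt_of_le_of_ne h.1 h.2)
  have hperm2 : ((PySem.List.sorted slice_lines (fun x => x) false).filter
        (fun j => decide (1 <= j ∧ j <= (lines.length : Int)))).Perm
      ((PySem.List.pyRange 1 (1 + lines.length) 1).filter
        (fun j => decide (j ∈ slice_lines))) := by
    rw [List.perm_ext_iff_of_nodup (hndl.filter _) ((PySem.List.nodup_pyRange_one ..).filter _)]
    intro a
    simp only [List.mem_filter, PySem.List.mem_pyRange_one, hperm.mem_iff, decide_eq_true_eq]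
    have harith : 1 ≤ a ∧ a ≤ (lines.length : Int) ↔ 1 ≤ a ∧ a < 1 + lines.length := by omega
    tauto
  exact List.Perm.eq_of_pairwise
    (fun a b _ _ h1 h2 => absurd h1 (lt_asymm h2))
    (List.Pairwise.filter _ hlt)
    (List.Pairwise.filter _ (PySem.List.pairwise_lt_pyRange_one ..))
    hperm2

-- ===== VERDICT (by name: the statement is the Claim_ definition above) =====
theorem extract_slice_code_spec : Claim_equal_extract_slice_code := by
  intro lines slice_lines _ hpre
  unfold Spec_extract_slice_code
  rw [a_eq, alt_eq, lists_eq lines slice_lines hpre]
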